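-- pv_equiv track=rewrite | github.com/ebragas/recruitcrm-mcp | docs/api-reference/_work/tidy.py | strip_trailing_backslashes_in_fences
-- ===== SOURCE A (Python) =====
-- def strip_trailing_backslashes_in_fences(text: str) -> str:
--     """Inside fences, strip the trailing `\\` markdown escape from each line.
--     These are artifacts of the scraper escaping JSON-line boundaries.
--
--     Exception: cURL blocks legitimately use `\\` for line continuation — leave
--     those intact.
--     """
--     out = []
--     in_fence = False
--     is_curl_block = False
--     block_first_content_seen = False
--     for line in text.splitlines():
--         stripped = line.strip()
--         if stripped.startswith("```"):
--             if not in_fence: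
--                 # entering a new fence — reset detection state
--                 is_curl_block = False
--                 block_first_content_seen = False
--             in_fence = not in_fence
--             out.append(line)
--             continue
--         if in_fence and not block_first_content_seen and stripped:
--             block_first_content_seen = True
--             if stripped.startswith("curl "):
--                 is_curl_block = True
--         if in_fence and not is_curl_block and line.endswith("\\"):
--             out.append(line[:-1].rstrip())
--             continue
--         out.append(line)
--     return "\n".join(out)
-- ===== SOURCE B (Python) =====
-- def strip_trailing_backslashes_in_fences(text: str) -> str:
--     """Segment-based rewrite: split the lines at fence markers, decide curl-ness
--     per segment, and map the backslash-strip over non-curl segments."""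
--     lines = text.splitlines()
--     out = []
--     i = 0
--     n = len(lines)
--     while i < n:
--         line = lines[i]
--         i += 1
--         out.append(line)
--         if not line.strip().startswith("```"):
--             continue
--         # collect the inside-fence segment
--         seg = []
--         while i < n and not lines[i].strip().startswith("```"):
--             seg.append(lines[i])
--             i += 1
--         first = next((l.strip() for l in seg if l.strip()), "")
--         if first.startswith("curl "):
--             out.extend(seg)
--         else:
--             out.extend(l[:-1].rstrip() if l.endswith("\\") else l for l in seg)
--         if i < n:
--             out.append(lines[i])  # closing fence line
--             i += 1
--     return "\n".join(out)
-- ===== Notes on version B (the rewrite author's own statement) =====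
-- stated objective: alternative
-- what changed: Replaced A's single fold carrying three boolean flags by a segmentation decomposition: the lines are split at fence-marker lines, each inside-fence segment's curl-ness is decided once by scanning for its first non-blank line, and the backslash-strip is mapped over non-curl segments.
import Mathlib
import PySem

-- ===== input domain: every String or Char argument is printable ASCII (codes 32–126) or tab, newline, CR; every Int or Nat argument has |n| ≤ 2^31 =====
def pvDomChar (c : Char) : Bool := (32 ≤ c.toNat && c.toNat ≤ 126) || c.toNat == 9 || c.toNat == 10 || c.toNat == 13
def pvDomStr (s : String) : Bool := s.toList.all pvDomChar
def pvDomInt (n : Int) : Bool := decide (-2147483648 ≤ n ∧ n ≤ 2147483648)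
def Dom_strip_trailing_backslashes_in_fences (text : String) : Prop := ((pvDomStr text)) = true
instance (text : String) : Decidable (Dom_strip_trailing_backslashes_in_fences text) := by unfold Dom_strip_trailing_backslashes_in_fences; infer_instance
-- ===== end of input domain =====

-- B replaces A's one-pass boolean state machine by a segmentation decomposition
-- (split the lines at fence markers, decide curl-ness once per segment, map the
-- backslash-strip over non-curl segments); objective: alternative/simpler structure.

-- ===== PORT A =====
-- one iteration of A's for-loop; state = (out, in_fence, is_curl_block, block_first_content_seen)
def pvAStep (st : List (List Char) × Bool × Bool × Bool) (line : List Char) :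
    List (List Char) × Bool × Bool × Bool :=
  let out := st.1
  let inF := st.2.1
  let isCurl := st.2.2.1
  let seen := st.2.2.2
  let stripped := PySem.Chars.strip line
  if PySem.Chars.startswith stripped "```".toList then
    if inF then (out ++ [line], false, isCurl, seen)
    else (out ++ [line], true, false, false)
  else
    let fire := inF && !seen && !stripped.isEmpty
    let isCurl' := if fire && PySem.Chars.startswith stripped "curl ".toList then true else isCurl
    let seen' := if fire then true else seen
    if inF && !isCurl' && PySem.Chars.endswith line "\\".toList then
      (out ++ [PySem.Chars.rstrip (PySem.Chars.slice line none (some (-1)))], inF, isCurl', seen')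
    else (out ++ [line], inF, isCurl', seen')

def strip_trailing_backslashes_in_fences (text : String) : String :=
  String.ofList (PySem.Chars.join "\n".toList
    (((PySem.Chars.splitlines text.toList).foldl pvAStep ([], false, false, false)).1))

-- ===== PORT B =====
def pvIsFence (line : List Char) : Bool :=
  PySem.Chars.startswith (PySem.Chars.strip line) "```".toList

def pvStripBS (line : List Char) : List Char :=
  if PySem.Chars.endswith line "\\".toList then
    PySem.Chars.rstrip (PySem.Chars.slice line none (some (-1)))
  else line

-- B's inner while loop: collect lines up to (not including) the next fence marker
def pvCollectSeg : List (List Char) → List (List Char) × List (List Char)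
  | [] => ([], [])
  | l :: rest =>
    if pvIsFence l then ([], l :: rest)
    else (l :: (pvCollectSeg rest).1, (pvCollectSeg rest).2)

-- B's `next((l.strip() for l in seg if l.strip()), "").startswith("curl ")`
def pvIsCurlSeg (seg : List (List Char)) : Bool :=
  match seg.find? (fun l => !(PySem.Chars.strip l).isEmpty) with
  | some l => PySem.Chars.startswith (PySem.Chars.strip l) "curl ".toList
  | none => false

lemma pvCollectSeg_snd_length (xs : List (List Char)) : (pvCollectSeg xs).2.length ≤ xs.length := by
  induction xs with
  | nil => simp [pvCollectSeg]
  | cons l rest ih =>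
    simp only [pvCollectSeg]
    split
    · simp
    · simpa using Nat.le_succ_of_le ih

mutual
-- B's outer while loop
def pvGoOutside : List (List Char) → List (List Char)
  | [] => []
  | l :: rest =>
    if pvIsFence l then
      l :: ((if pvIsCurlSeg (pvCollectSeg rest).1 then (pvCollectSeg rest).1
             else (pvCollectSeg rest).1.map pvStripBS) ++ pvCloseTail (pvCollectSeg rest).2)
    else l :: pvGoOutside rest
termination_by xs => xs.length
decreasing_by
  · have := pvCollectSeg_snd_length rest; simp; omega
  · simp
-- B's `if i < n: out.append(lines[i]); i += 1` after a segment
def pvCloseTail : List (List Char) → List (List Char)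
  | [] => []
  | c :: r => c :: pvGoOutside r
termination_by xs => xs.length
decreasing_by simp
end

def strip_trailing_backslashes_in_fences_alt (text : String) : String :=
  String.ofList (PySem.Chars.join "\n".toList (pvGoOutside (PySem.Chars.splitlines text.toList)))

-- ===== PRECONDITION & SPEC =====
def Spec_strip_trailing_backslashes_in_fences (text : String) (out : String) : Prop := out = strip_trailing_backslashes_in_fences_alt text
instance (text : String) (out : String) : Decidable (Spec_strip_trailing_backslashes_in_fences text out) := by unfold Spec_strip_trailing_backslashes_in_fences; infer_instance

-- ===== CLAIM (what is proved, stated in full; the proofs are below) =====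
def Claim_equal_strip_trailing_backslashes_in_fences : Prop := ∀ (text : String), Dom_strip_trailing_backslashes_in_fences text → Spec_strip_trailing_backslashes_in_fences text (strip_trailing_backslashes_in_fences text)

-- ===== LEMMAS AND PROOFS =====

-- a line whose strip() is empty is all whitespace, …
lemma pvStripAllSpace (l : List Char) (h : PySem.Chars.strip l = []) :
    ∀ c ∈ l, PySem.Chars.isspace c = true := by
  intro c hc
  have h1 : ∀ x ∈ PySem.Chars.lstrip l, PySem.Chars.isspace x = true := by
    intro x hx
    have hd : List.dropWhile PySem.Chars.isspace (PySem.Chars.lstrip l).reverse = [] := by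
      simpa [PySem.Chars.strip, PySem.Chars.rstrip] using h
    exact (List.dropWhile_eq_nil_iff).1 hd x (List.mem_reverse.2 hx)
  rcases (List.mem_append.1 (by rw [List.takeWhile_append_dropWhile]; exact hc :
      c ∈ List.takeWhile PySem.Chars.isspace l ++ List.dropWhile PySem.Chars.isspace l)) with h2 | h2
  · exact List.mem_takeWhile_imp h2
  · exact h1 c h2

-- … so it cannot end with a backslash
lemma pvStripNilNoBS (l : List Char) (h : PySem.Chars.strip l = []) :
    PySem.Chars.endswith l "\\".toList = false := by
  by_contra hb
  have hb' : PySem.Chars.endswith l "\\".toList = true := by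
    cases hx : PySem.Chars.endswith l "\\".toList
    · exact absurd hx hb
    · rfl
  have hs : "\\".toList <:+ l := (PySem.Chars.endswith_iff l _).1 hb'
  have hm : '\\' ∈ l := hs.mem (by simp)
  have := pvStripAllSpace l h '\\' hm
  simp [PySem.Chars.isspace] at this

lemma pvMain (n : Nat) : ∀ lines : List (List Char), lines.length ≤ n →
    (∀ out c f, ((lines.foldl pvAStep (out, false, c, f)).1 = out ++ pvGoOutside lines)) ∧
    (∀ out, ((lines.foldl pvAStep (out, true, false, false)).1 =
      out ++ ((if pvIsCurlSeg (pvCollectSeg lines).1 then (pvCollectSeg lines).1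
               else (pvCollectSeg lines).1.map pvStripBS) ++ pvCloseTail (pvCollectSeg lines).2))) ∧
    (∀ out, ((lines.foldl pvAStep (out, true, true, true)).1 =
      out ++ ((pvCollectSeg lines).1 ++ pvCloseTail (pvCollectSeg lines).2))) ∧
    (∀ out, ((lines.foldl pvAStep (out, true, false, true)).1 =
      out ++ ((pvCollectSeg lines).1.map pvStripBS ++ pvCloseTail (pvCollectSeg lines).2))) := by
  induction n with
  | zero =>
    intro lines hl
    have hnil : lines = [] := List.eq_nil_of_length_eq_zero (Nat.le_zero.1 hl)
    subst hnil
    refine ⟨fun out c f => ?_, fun out => ?_, fun out => ?_, fun out => ?_⟩ <;>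
      simp [pvGoOutside, pvCollectSeg, pvIsCurlSeg, pvCloseTail]
  | succ n ih =>
    intro lines hl
    cases lines with
    | nil =>
      refine ⟨fun out c f => ?_, fun out => ?_, fun out => ?_, fun out => ?_⟩ <;>
        simp [pvGoOutside, pvCollectSeg, pvIsCurlSeg, pvCloseTail]
    | cons l rest =>
      have hr : rest.length ≤ n := by
        have := hl; simp at this; omega
      obtain ⟨ih1, ih2, ih3, ih4⟩ := ih rest hr
      cases hf : PySem.Chars.startswith (PySem.Chars.strip l) ['`', '`', '`'] with
      | true =>
        refine ⟨fun out c f => ?_, fun out => ?_, fun out => ?_, fun out => ?_⟩ <;>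
          simp [pvAStep, hf, pvGoOutside, pvCollectSeg, pvCloseTail, pvIsFence, pvIsCurlSeg,
            ih1, ih2]
      | false =>
        cases hs : (PySem.Chars.strip l).isEmpty with
        | true =>
          -- whitespace-only line: cannot end with a backslash
          have hse : PySem.Chars.strip l = [] := by
            simpa [List.isEmpty_iff] using hs
          have hbs : PySem.Chars.endswith l ['\\'] = false := by
            simpa using pvStripNilNoBS l hse
          refine ⟨fun out c f => ?_, fun out => ?_, fun out => ?_, fun out => ?_⟩
          · simp [pvAStep, hf, hbs, pvGoOutside, pvIsFence, ih1]
          · have hcurl : pvIsCurlSeg (l :: (pvCollectSeg rest).1) = pvIsCurlSeg (pvCollectSeg rest).1 := by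
              simp [pvIsCurlSeg, List.find?, hse]
            cases hc : pvIsCurlSeg (pvCollectSeg rest).1 <;>
              simp [pvAStep, hf, hs, hbs, pvCollectSeg, pvIsFence, hcurl, hc, ih2,
                pvStripBS]
          · simp [pvAStep, hf, hs, hbs, pvCollectSeg, pvIsFence, ih3]
          · simp [pvAStep, hf, hs, hbs, pvCollectSeg, pvIsFence, ih4, pvStripBS]
        | false =>
          cases hc : PySem.Chars.startswith (PySem.Chars.strip l) ['c', 'u', 'r', 'l', ' '] with
          | true =>
            have hcurl : pvIsCurlSeg (l :: (pvCollectSeg rest).1) = true := by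
              simp [pvIsCurlSeg, List.find?, hs, hc]
            refine ⟨fun out c f => ?_, fun out => ?_, fun out => ?_, fun out => ?_⟩
            · simp [pvAStep, hf, hs, pvGoOutside, pvIsFence, ih1]
            · simp [pvAStep, hf, hs, hc, pvCollectSeg, pvIsFence, hcurl, ih3]
            · simp [pvAStep, hf, hs, pvCollectSeg, pvIsFence, ih3]
            · cases he : PySem.Chars.endswith l ['\\'] <;>
                simp [pvAStep, hf, hs, he, pvCollectSeg, pvIsFence, ih4, pvStripBS]
          | false =>
            have hcurl : pvIsCurlSeg (l :: (pvCollectSeg rest).1) = false := by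
              simp [pvIsCurlSeg, List.find?, hs, hc]
            refine ⟨fun out c f => ?_, fun out => ?_, fun out => ?_, fun out => ?_⟩
            · simp [pvAStep, hf, hs, pvGoOutside, pvIsFence, ih1]
            · cases he : PySem.Chars.endswith l ['\\'] <;>
                simp [pvAStep, hf, hs, hc, he, pvCollectSeg, pvIsFence, hcurl, ih4, pvStripBS]
            · simp [pvAStep, hf, hs, pvCollectSeg, pvIsFence, ih3]
            · cases he : PySem.Chars.endswith l ['\\'] <;>
                simp [pvAStep, hf, hs, he, pvCollectSeg, pvIsFence, ih4, pvStripBS]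

-- ===== VERDICT (by name: the statement is the Claim_ definition above) =====
theorem strip_trailing_backslashes_in_fences_spec : Claim_equal_strip_trailing_backslashes_in_fences := by
  intro text _
  unfold Spec_strip_trailing_backslashes_in_fences
  unfold strip_trailing_backslashes_in_fences strip_trailing_backslashes_in_fences_alt
  have h := (pvMain (PySem.Chars.splitlines text.toList).length
      (PySem.Chars.splitlines text.toList) (le_refl _)).1 [] false false
  rw [h]; simp
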